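-- pv_equiv track=rewrite | github.com/pacoULBS/Limbaje-Formale- | table_reader.py | detect_and_transform
-- ===== SOURCE A (Python) =====
-- from typing import List
--
-- def detect_and_transform(rows: List[List[str]]) -> (List[str], List[List[str]]):
--     """
--     Detect format and, if needed, transform symbol-per-row -> state-per-row.
--
--     Returns (header, data) where header is list of column names and data is list of rows (each row list).
--     The returned format matches what the pretty-printer expects: header[0] == 'state', data rows start with state index.
--     """
--     if not rows:
--         raise RuntimeError("Fișier CSV gol")
--
--     # Heuristic: if first row first cell is 'state' (case-insensitive), assume old format (state-per-row, header present)
--     first = rows[0]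
--     if first and first[0].strip().lower() == 'state' and len(rows) > 1:
--         header = first
--         data = rows[1:]
--         return header, data
--
--     # Another heuristic: if every row's length equals and first column of each row is a symbol (non-numeric),
--     # and there are multiple rows, treat as symbol-per-row (action_table)
--     # symbol-per-row layout: each row = [symbol, val_state0, val_state1, ...]
--     # We'll transform to state-per-row: header = ['state', sym1, sym2, ...], rows: [0, cell(sym1,state0), cell(sym2,state0), ...], ...
--     row0_len = len(rows[0])
--     # Validate consistent column count
--     consistent = all(len(r) == row0_len for r in rows)
--     if consistent and row0_len >= 2:
--         symbols = [r[0] for r in rows]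
--         num_states = row0_len - 1
--         header = ['state'] + symbols
--         data = []
--         for s in range(num_states):
--             row = [str(s)]
--             for r in rows:
--                 # r is a symbol row: r[1 + s] is the cell for state s
--                 val = ""
--                 if 1 + s < len(r):
--                     val = r[1 + s]
--                 row.append(val)
--             data.append(row)
--         return header, data
--
--     # Fallback: maybe the CSV is already state-per-row but without header.
--     # We try to detect: if first column values are numeric (state indices) across many rows, assume state-per-row without header
--     all_first_numeric = all((len(r) > 0 and r[0].strip().isdigit()) for r in rows)
--     if all_first_numeric:
--         # create header as generic: 'state', col1..colN-1
--         cols = len(rows[0])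
--         header = ['state'] + [f"col{i}" for i in range(1, cols)]
--         data = rows
--         return header, data
--
--     # If we cannot detect, raise error
--     raise RuntimeError("Format CSV necunoscut. Aștept fie 'state' header, fie action_table (simbol-per-rând), fie state-per-rând fără header.")
-- ===== SOURCE B (Python) =====
-- def detect_and_transform(rows):
--     if not rows:
--         raise RuntimeError("Fișier CSV gol")
--     first = rows[0]
--     if first and first[0].strip().lower() == 'state' and len(rows) > 1:
--         return first, rows[1:]
--     n = len(first)
--     # One fused pass over the rows: the consistency flag, the all-numeric flag, the
--     # symbol column and every state column are accumulated together while scanning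
--     # the rows once (A instead makes four separate scans, one of them states-outer).
--     consistent, numeric = True, True
--     symbols = []
--     cols = [[] for _ in range(n - 1)]
--     for r in rows:
--         consistent = consistent and len(r) == n
--         numeric = numeric and len(r) > 0 and r[0].strip().isdigit()
--         symbols.append(r[0] if r else "")
--         cells = [r[1 + s] if 1 + s < len(r) else "" for s in range(n - 1)]
--         for c, v in zip(cols, cells):
--             c.append(v)
--     if consistent and n >= 2:
--         return ['state'] + symbols, [[str(s)] + c for s, c in enumerate(cols)]
--     if numeric:
--         return ['state'] + [f"col{i}" for i in range(1, n)], rows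
--     raise RuntimeError("Format CSV necunoscut. Aștept fie 'state' header, fie action_table (simbol-per-rând), fie state-per-rând fără header.")
-- ===== Notes on version B (the rewrite author's own statement) =====
-- stated objective: alternative
-- what changed: A scans the rows four times (consistency check, symbol list, a states-outer/rows-inner nested transpose loop, digit check); B makes ONE fused pass over the rows that accumulates both detection flags, the symbol column and every state column together, then just prefixes the state indices.
import Mathlib
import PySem

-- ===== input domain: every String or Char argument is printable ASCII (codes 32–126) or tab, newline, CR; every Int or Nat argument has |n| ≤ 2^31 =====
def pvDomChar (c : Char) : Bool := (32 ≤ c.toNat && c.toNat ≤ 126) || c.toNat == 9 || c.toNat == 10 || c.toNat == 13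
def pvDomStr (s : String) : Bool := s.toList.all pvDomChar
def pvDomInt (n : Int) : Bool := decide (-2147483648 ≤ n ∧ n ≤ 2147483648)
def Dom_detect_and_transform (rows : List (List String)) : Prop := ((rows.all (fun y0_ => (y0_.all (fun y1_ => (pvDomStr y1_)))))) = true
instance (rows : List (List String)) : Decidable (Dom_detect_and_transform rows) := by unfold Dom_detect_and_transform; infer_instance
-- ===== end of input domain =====

-- B replaces A's four separate scans of the rows (consistency check, symbol list,
-- states-outer/rows-inner nested transpose loop, digit check) by ONE fused pass that
-- accumulates both detection flags, the symbol column and all state columns together;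
-- format-detection outcomes are unchanged. Where the Python raises RuntimeError
-- (empty input / undetectable format) the ports return ([], []); those inputs are
-- excluded by Pre_detect_and_transform.

-- ===== PORT A =====
def detect_and_transform (rows : List (List String)) : List String × List (List String) :=
  match rows with
  | [] => ([], [])  -- Python: raise RuntimeError (excluded by Pre_)
  | first :: rest =>
    if first ≠ [] ∧ PySem.Str.lower (PySem.Str.strip (first.headD "")) = "state" ∧ 1 < (first :: rest).length then
      (first, rest)
    else
      let row0_len := first.length
      -- consistent = all(len(r) == row0_len for r in rows)
      if ((first :: rest).all (fun r => r.length == row0_len)) = true ∧ 2 ≤ row0_len then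
        -- r[0] exact under the guard: every row has length row0_len ≥ 2, hence nonempty
        let symbols := (first :: rest).map (fun r => r.headD "")
        let num_states := row0_len - 1
        let header := "state" :: symbols
        let data := (List.range num_states).map (fun s =>
          (first :: rest).foldl (fun row r =>
            -- val = r[1+s] under the bounds guard 1 + s < len(r), else "" (r.getD is exact there)
            row ++ [if 1 + s < r.length then r.getD (1 + s) "" else ""]) [PySem.Int.toStr (Int.ofNat s)])
        (header, data)
      else
        if ((first :: rest).all (fun r => decide (0 < r.length) && PySem.Str.strIsdigit (PySem.Str.strip (r.headD "")))) = true then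
          ("state" :: (PySem.List.pyRange 1 (first.length : Int) 1).map (fun i => "col" ++ PySem.Int.toStr i),
           first :: rest)
        else
          ([], [])  -- Python: raise RuntimeError (excluded by Pre_)

-- ===== PORT B =====
-- the body of B's single loop over the rows (state: consistent, numeric, symbols, cols)
def pvStep (n : Nat) (st : Bool × Bool × List String × List (List String)) (r : List String) :
    Bool × Bool × List String × List (List String) :=
  ( st.1 && (r.length == n),
    st.2.1 && (decide (0 < r.length) && PySem.Str.strIsdigit (PySem.Str.strip (r.headD ""))),
    st.2.2.1 ++ [if r ≠ [] then r.headD "" else ""],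
    List.zipWith (fun c v => c ++ [v]) st.2.2.2
      ((List.range (n - 1)).map (fun s => if 1 + s < r.length then r.getD (1 + s) "" else "")) )

def detect_and_transform_alt (rows : List (List String)) : List String × List (List String) :=
  match rows with
  | [] => ([], [])  -- Python: raise RuntimeError (excluded by Pre_)
  | first :: rest =>
    if first ≠ [] ∧ PySem.Str.lower (PySem.Str.strip (first.headD "")) = "state" ∧ 1 < (first :: rest).length then
      (first, rest)
    else
      let n := first.length
      -- one fused pass accumulating (consistent, numeric, symbols, cols)
      let st := (first :: rest).foldl (pvStep n)
        (true, true, [], (List.range (n - 1)).map (fun _ => ([] : List String)))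
      if st.1 = true ∧ 2 ≤ n then
        ("state" :: st.2.2.1,
         (PySem.List.enumerate st.2.2.2 0).map (fun p => PySem.Int.toStr p.1 :: p.2))
      else
        if st.2.1 = true then
          ("state" :: (PySem.List.pyRange 1 (first.length : Int) 1).map (fun i => "col" ++ PySem.Int.toStr i),
           first :: rest)
        else
          ([], [])  -- Python: raise RuntimeError (excluded by Pre_)

-- ===== PRECONDITION & SPEC =====
-- Pre_ excludes exactly the inputs on which the Python raises RuntimeError: the empty list,
-- and inputs matching none of the three detection heuristics ("unknown CSV format").
def Pre_detect_and_transform (rows : List (List String)) : Prop :=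
  rows ≠ [] ∧
  ( (rows.headD [] ≠ [] ∧ PySem.Str.lower (PySem.Str.strip ((rows.headD []).headD "")) = "state" ∧ 1 < rows.length)
  ∨ (2 ≤ (rows.headD []).length ∧ ∀ r ∈ rows, r.length = (rows.headD []).length)
  ∨ (∀ r ∈ rows, r ≠ [] ∧ PySem.Str.strIsdigit (PySem.Str.strip (r.headD "")) = true) )

instance (rows : List (List String)) : Decidable (Pre_detect_and_transform rows) := by
  unfold Pre_detect_and_transform; infer_instance

def pvWitness_detect_and_transform : List (List String) := [["a", "1"], ["b", "2"]]

def Spec_detect_and_transform (rows : List (List String)) (out : List String × List (List String)) : Prop := out = detect_and_transform_alt rows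
instance (rows : List (List String)) (out : List String × List (List String)) : Decidable (Spec_detect_and_transform rows out) := by unfold Spec_detect_and_transform; infer_instance

-- ===== CLAIM (what is proved, stated in full; the proofs are below) =====
def Claim_equal_detect_and_transform : Prop := ∀ (rows : List (List String)), Dom_detect_and_transform rows → Pre_detect_and_transform rows → Spec_detect_and_transform rows (detect_and_transform rows)

-- ===== LEMMAS AND PROOFS =====

-- closed form of B's fused fold
theorem pvStep_fold (n : Nat) (xs : List (List String)) :
    ∀ (c d : Bool) (syms : List String) (g : Nat → List String),
    xs.foldl (pvStep n) (c, d, syms, (List.range (n - 1)).map g)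
    = ( c && xs.all (fun r => r.length == n),
        d && xs.all (fun r => decide (0 < r.length) && PySem.Str.strIsdigit (PySem.Str.strip (r.headD ""))),
        syms ++ xs.map (fun r => if r ≠ [] then r.headD "" else ""),
        (List.range (n - 1)).map (fun k =>
          g k ++ xs.map (fun r => if 1 + k < r.length then r.getD (1 + k) "" else "")) ) := by
  induction xs with
  | nil => intro c d syms g; simp
  | cons x xs ih =>
    intro c d syms g
    have hz : List.zipWith (fun c v => c ++ [v]) ((List.range (n - 1)).map g)
        ((List.range (n - 1)).map (fun s => if 1 + s < x.length then x.getD (1 + s) "" else ""))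
        = (List.range (n - 1)).map
            (fun k => g k ++ [if 1 + k < x.length then x.getD (1 + k) "" else ""]) := by
      rw [List.zipWith_map, List.zipWith_self]
    simp only [List.foldl_cons, pvStep, hz]
    rw [ih (c && (x.length == n)) _ _ (fun k => g k ++ [if 1 + k < x.length then x.getD (1 + k) "" else ""])]
    simp [Bool.and_assoc, List.append_assoc]

-- the transpose branch: A's states-outer nested loop equals B's accumulated columns
theorem branch2_eq (n : Nat) (rows : List (List String)) :
    (List.range (n - 1)).map (fun s =>
      rows.foldl (fun row r =>
        row ++ [if 1 + s < r.length then r.getD (1 + s) "" else ""]) [PySem.Int.toStr (Int.ofNat s)])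
    = (PySem.List.enumerate ((List.range (n - 1)).map (fun k =>
        ([] : List String) ++ rows.map (fun r => if 1 + k < r.length then r.getD (1 + k) "" else ""))) 0).map
        (fun p => PySem.Int.toStr p.1 :: p.2) := by
  rw [PySem.List.enumerate_eq_map_pyRange _ ([] : List String)]
  have hlen' : PySem.List.len ((List.range (n - 1)).map (fun k =>
      ([] : List String) ++ rows.map (fun r => if 1 + k < r.length then r.getD (1 + k) "" else "")))
      = ((n - 1 : Nat) : Int) := by
    simp [PySem.List.len]
  rw [hlen', PySem.List.pyRange_zero_nat, List.map_map, List.map_map]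
  apply List.map_congr_left
  intro k hk
  have hkm : k < n - 1 := List.mem_range.mp hk
  simp only [Function.comp_apply, PySem.List.pyGetD_natCast]
  rw [PySem.List.getD_map_range _ _ _ _ hkm]
  rw [PySem.List.foldl_append_singleton_eq_map]
  simp

-- B's accumulated symbol list is A's symbol list
theorem sym_eq (rows : List (List String)) :
    rows.map (fun r => if r ≠ [] then r.headD "" else "") = rows.map (fun r => r.headD "") := by
  apply List.map_congr_left
  intro r _
  cases r <;> simp

-- ===== VERDICT (by name: the statement is the Claim_ definition above) =====
theorem detect_and_transform_spec : Claim_equal_detect_and_transform := by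
  intro rows _ hpre
  unfold Spec_detect_and_transform
  obtain ⟨hne, -⟩ := hpre
  match rows with
  | [] => exact absurd rfl hne
  | first :: rest =>
    simp only [detect_and_transform, detect_and_transform_alt]
    by_cases h1 : first ≠ [] ∧ PySem.Str.lower (PySem.Str.strip (first.headD "")) = "state" ∧
        1 < (first :: rest).length
    · rw [if_pos h1, if_pos h1]
    · rw [if_neg h1, if_neg h1]
      rw [pvStep_fold first.length (first :: rest) true true [] (fun _ => ([] : List String))]
      simp only [Bool.true_and, List.nil_append]
      by_cases h2 : ((first :: rest).all (fun r => r.length == first.length)) = true ∧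
          2 ≤ first.length
      · rw [if_pos h2, if_pos h2]
        rw [branch2_eq first.length (first :: rest), sym_eq]
        simp
      · rw [if_neg h2, if_neg h2]
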